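-- pv_equiv track=rewrite | github.com/arras-energy/gridlabd | converters/csv-ami2glm-player.py | filter_dict_by_min_value
-- ===== SOURCE A (Python) =====
-- def filter_dict_by_min_value(input_dict, patterns):
--     result_dict = {}
--     for pattern in patterns:
--         pattern_dictionary = {key: value for key, value in input_dict.items() if pattern in key}
--         min_value = min(pattern_dictionary.values())
--         min_dict = {key: value for key, value in pattern_dictionary.items() if value == min_value}
--         result_dict.update(min_dict)
--     return list(result_dict.keys())
-- ===== SOURCE B (Python) =====
-- def filter_dict_by_min_value(input_dict, patterns):
--     kept = {}
--     for pattern in patterns: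
--         current_min = None
--         candidates = []
--         for key, value in input_dict.items():
--             if pattern in key:
--                 if current_min is None or value < current_min:
--                     current_min = value
--                     candidates = [key]
--                 elif value == current_min:
--                     candidates.append(key)
--         if current_min is None:
--             raise ValueError("min() arg is an empty sequence")
--         for key in candidates:
--             kept[key] = None
--     return list(kept)
-- ===== Notes on version B (the rewrite author's own statement) =====
-- stated objective: alternative
-- what changed: Per pattern, A builds the filtered sub-dict, calls min() over its values and filters again for the minimal entries; B makes a single pass over the items keeping the running minimum and its candidate key list, and accumulates kept keys in an ordered set; Pre_ excludes the inputs where some pattern matches no key, on which both programs raise ValueError.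
import Mathlib
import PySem

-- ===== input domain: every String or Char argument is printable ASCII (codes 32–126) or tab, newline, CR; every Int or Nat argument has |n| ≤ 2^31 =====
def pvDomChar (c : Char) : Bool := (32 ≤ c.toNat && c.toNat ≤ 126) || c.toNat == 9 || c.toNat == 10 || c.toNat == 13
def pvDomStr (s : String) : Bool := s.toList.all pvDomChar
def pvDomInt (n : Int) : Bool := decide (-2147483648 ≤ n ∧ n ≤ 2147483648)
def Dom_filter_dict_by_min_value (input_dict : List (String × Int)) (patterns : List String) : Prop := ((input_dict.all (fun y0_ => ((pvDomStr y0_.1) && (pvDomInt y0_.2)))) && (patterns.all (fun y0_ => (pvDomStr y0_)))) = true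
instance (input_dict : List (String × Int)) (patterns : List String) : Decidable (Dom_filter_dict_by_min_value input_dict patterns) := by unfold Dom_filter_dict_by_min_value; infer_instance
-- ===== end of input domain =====

-- B replaces A's three passes per pattern (filter, min(), filter-by-min) by a single scan per
-- pattern keeping the running minimum and its candidate keys (objective: alternative decomposition).
-- Like A, B raises ValueError when a pattern matches no key (those inputs are outside Pre_).
-- The equivalence is about the RETURN value; neither program mutates its arguments.

-- ===== PORT A =====
-- loop body of A: pattern_dictionary / min() / min_dict / result_dict.update(min_dict)
def pvAStep (items : List (String × Int)) (result_dict : PySem.Dict String Int) (pattern : String) : PySem.Dict String Int :=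
  let pattern_dictionary := items.filter (fun kv => PySem.Str.isIn pattern kv.1)
  match PySem.List.min? (pattern_dictionary.map (·.2)) (fun v => v) with
  | none => result_dict   -- Python's min([]) raises ValueError here; excluded by Pre_
  | some min_value =>
    let min_dict := pattern_dictionary.filter (fun kv => kv.2 == min_value)
    min_dict.foldl (fun r kv => r.insert kv.1 kv.2) result_dict

def filter_dict_by_min_value (input_dict : List (String × Int)) (patterns : List String) : List String :=
  (patterns.foldl (pvAStep (PySem.Dict.ofList input_dict).items) PySem.Dict.empty).keys

-- ===== PORT B =====
-- B's inner loop: one pass over the items keeping (current_min, candidates)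
def pvBScan (items : List (String × Int)) (pattern : String) : Option Int × List String :=
  items.foldl (fun acc kv =>
    if PySem.Str.isIn pattern kv.1 then
      match acc.1 with
      | none => (some kv.2, [kv.1])
      | some m =>
        if kv.2 < m then (some kv.2, [kv.1])
        else if kv.2 == m then (acc.1, acc.2 ++ [kv.1])
        else acc
    else acc) (none, [])

def filter_dict_by_min_value_alt (input_dict : List (String × Int)) (patterns : List String) : List String :=
  let items := (PySem.Dict.ofList input_dict).items
  -- Python B raises ValueError when a pattern matches no key (current_min is None); those
  -- inputs are outside Pre_, and the port then simply adds no candidate keys.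
  patterns.foldl (fun kept pattern => (pvBScan items pattern).2.foldl PySem.Set.add kept) PySem.Set.empty

-- ===== PRECONDITION & SPEC =====
-- Pre_ excludes exactly the inputs where Python A raises ValueError (min() of an empty
-- sequence): some pattern is a substring of no key of the dict.
def Pre_filter_dict_by_min_value (input_dict : List (String × Int)) (patterns : List String) : Prop :=
  ∀ p ∈ patterns, ∃ kv ∈ input_dict, PySem.Str.isIn p kv.1 = true
instance (input_dict : List (String × Int)) (patterns : List String) : Decidable (Pre_filter_dict_by_min_value input_dict patterns) := by unfold Pre_filter_dict_by_min_value; infer_instance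
def pvWitness_filter_dict_by_min_value : (List (String × Int)) × List String :=
  ([("ab", 2), ("cb", 1), ("db", 1)], ["", "b"])

def Spec_filter_dict_by_min_value (input_dict : List (String × Int)) (patterns : List String) (out : List String) : Prop := out = filter_dict_by_min_value_alt input_dict patterns
instance (input_dict : List (String × Int)) (patterns : List String) (out : List String) : Decidable (Spec_filter_dict_by_min_value input_dict patterns out) := by unfold Spec_filter_dict_by_min_value; infer_instance

-- ===== CLAIM (what is proved, stated in full; the proofs are below) =====
def Claim_equal_filter_dict_by_min_value : Prop := ∀ (input_dict : List (String × Int)) (patterns : List String), Dom_filter_dict_by_min_value input_dict patterns → Pre_filter_dict_by_min_value input_dict patterns → Spec_filter_dict_by_min_value input_dict patterns (filter_dict_by_min_value input_dict patterns)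
-- ===== LEMMAS AND PROOFS =====

-- abbreviation for B's inner fold step restricted to matching items (after List.foldl_filter)
def pvBStepMatch (acc : Option Int × List String) (kv : String × Int) : Option Int × List String :=
  match acc.1 with
  | none => (some kv.2, [kv.1])
  | some m =>
    if kv.2 < m then (some kv.2, [kv.1])
    else if kv.2 == m then (acc.1, acc.2 ++ [kv.1])
    else acc

lemma pvBStepMatch_some (m : Int) (cs : List String) (kv : String × Int) :
    pvBStepMatch (some m, cs) kv
      = if kv.2 < m then (some kv.2, [kv.1])
        else if kv.2 = m then (some m, cs ++ [kv.1])
        else (some m, cs) := by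
  simp [pvBStepMatch]

lemma pvSetUpdate_eq_foldl {α : Type} [BEq α] (s : PySem.Set α) (xs : List α) :
    PySem.Set.update s xs = xs.foldl PySem.Set.add s := by
  induction xs generalizing s with
  | nil => rw [PySem.Set.update_nil]; rfl
  | cons x xs ih => rw [PySem.Set.update_cons, ih]; rfl

lemma pvBScan_eq_filter (items : List (String × Int)) (pattern : String) :
    pvBScan items pattern
      = (items.filter (fun kv => PySem.Str.isIn pattern kv.1)).foldl pvBStepMatch (none, []) := by
  unfold pvBScan
  rw [List.foldl_filter]
  rfl

lemma pvFoldlMin_le (t : List (String × Int)) (a : Int) : (t.map (·.2)).foldl min a ≤ a := by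
  induction t generalizing a with
  | nil => simp
  | cons x t ih => simpa using le_trans (ih (min a x.2)) (min_le_left _ _)

-- characterization of the single-pass scan started in the 'some' state
lemma pvScan_some (t : List (String × Int)) (m : Int) (cs : List String) :
    t.foldl pvBStepMatch (some m, cs)
      = (some ((t.map (·.2)).foldl min m),
         (if m = (t.map (·.2)).foldl min m then cs else [])
           ++ (t.filter (fun kv => kv.2 == (t.map (·.2)).foldl min m)).map (·.1)) := by
  induction t generalizing m cs with
  | nil => simp
  | cons kv t ih =>
    rw [List.foldl_cons, pvBStepMatch_some]
    simp only [List.map_cons, List.foldl_cons, List.filter_cons]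
    by_cases h1 : kv.2 < m
    · have hm : min m kv.2 = kv.2 := by omega
      have hne : ¬ m = (t.map (·.2)).foldl min kv.2 := by
        have := pvFoldlMin_le t kv.2; omega
      rw [if_pos h1]
      simp only [hm]
      rw [ih]
      by_cases h2 : kv.2 = (t.map (·.2)).foldl min kv.2
      · rw [if_pos h2, if_neg hne, if_pos (beq_iff_eq.mpr h2)]
        simp
      · rw [if_neg h2, if_neg hne, if_neg (fun hc => h2 (beq_iff_eq.mp hc))]
    · have hm : min m kv.2 = m := by omega
      rw [if_neg h1]
      simp only [hm]
      by_cases h2 : kv.2 = m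
      · rw [if_pos h2, ih]
        by_cases h3 : m = (t.map (·.2)).foldl min m
        · rw [if_pos h3, if_pos h3, if_pos (beq_iff_eq.mpr (h2.trans h3))]
          simp
        · have hne2 : ¬ kv.2 = (t.map (·.2)).foldl min m := h2 ▸ h3
          rw [if_neg h3, if_neg h3, if_neg (fun hc => hne2 (beq_iff_eq.mp hc))]
      · rw [if_neg h2, ih]
        have hne : ¬ kv.2 = (t.map (·.2)).foldl min m := by
          have := pvFoldlMin_le t m; omega
        rw [if_neg (fun hc => hne (beq_iff_eq.mp hc))]

-- per-pattern: the keys A's update inserts are exactly B's candidate list, so the kept key sets evolve identically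
lemma pvStep_keys (items : List (String × Int)) (r : PySem.Dict String Int) (pattern : String) :
    (pvAStep items r pattern).keys
      = (pvBScan items pattern).2.foldl PySem.Set.add r.keys := by
  rw [pvBScan_eq_filter]
  unfold pvAStep
  cases hpd : items.filter (fun kv => PySem.Str.isIn pattern kv.1) with
  | nil => simp [show PySem.List.min? ([] : List Int) (fun v => v) = none from rfl]
  | cons kv t =>
    simp only [List.map_cons, PySem.List.min?_id_cons, List.foldl_cons]
    have hstep : pvBStepMatch (none, []) kv = (some kv.2, [kv.1]) := rfl
    rw [hstep, pvScan_some]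
    rw [show (fun (r : PySem.Dict String Int) (kv : String × Int) => r.insert kv.1 kv.2)
          = (fun (d : PySem.Dict String Int) (x : String × Int) => d.insert ((·.1) x) ((fun (_ : PySem.Dict String Int) (kv : String × Int) => kv.2) d x)) from rfl]
    rw [PySem.Dict.keys_foldl_insert_key, pvSetUpdate_eq_foldl]
    congr 1
    simp only [List.filter_cons]
    by_cases h : kv.2 = (t.map (·.2)).foldl min kv.2
    · rw [if_pos (beq_iff_eq.mpr h), if_pos h]
      simp
    · rw [if_neg (fun hc => h (beq_iff_eq.mp hc)), if_neg h]
      simp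

lemma pv_main (ps : List String) (items : List (String × Int))
    (r : PySem.Dict String Int) (kept : PySem.Set String) (h : r.keys = kept) :
    (ps.foldl (pvAStep items) r).keys
      = ps.foldl (fun kept pattern => (pvBScan items pattern).2.foldl PySem.Set.add kept) kept := by
  induction ps generalizing r kept with
  | nil => simpa using h
  | cons p ps ih =>
    simp only [List.foldl_cons]
    exact ih _ _ (by rw [pvStep_keys, h])

-- ===== VERDICT (by name: the statement is the Claim_ definition above) =====
theorem filter_dict_by_min_value_spec : Claim_equal_filter_dict_by_min_value := by
  intro input_dict patterns _ _
  unfold Spec_filter_dict_by_min_value filter_dict_by_min_value filter_dict_by_min_value_alt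
  exact pv_main patterns _ PySem.Dict.empty PySem.Set.empty rfl
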